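-- pv_equiv track=rewrite | github.com/pariweshsubedi/libra | language/stdlib/modules/tests/preproc.py | encode_strings
-- ===== SOURCE A (Python) =====
-- def encode_strings(source):
--     i = 0
--     out = ""
--     while i < len(source):
--         if source[i] == '"':
--             for j in range(i+1, len(source)):
--                 if source[j] == '"':
--                     match = source[i:j+1]
--                     new = match
--                     if source[i-1] != "b":
--                         new = 'h"{}"'.format(match[1:-1].encode().hex())
--
--                     out += new
--                     i = j + 0
--                     break
--         else:
--             out += source[i]
--         i += 1
--     return out
-- ===== SOURCE B (Python) =====
-- def encode_strings(source):
--     out = []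
--     buf = []
--     in_string = False
--     encode = True
--     for i in range(len(source)):
--         c = source[i]
--         if in_string:
--             if c == '"':
--                 if encode:
--                     out.append('h"' + ''.join(format(ord(x), '02x') for x in buf) + '"')
--                 else:
--                     out.append('"' + ''.join(buf) + '"')
--                 buf = []
--                 in_string = False
--             else:
--                 buf.append(c)
--         else:
--             if c == '"':
--                 in_string = True
--                 encode = source[i-1] != 'b'
--             else:
--                 out.append(c)
--     return ''.join(out) + ''.join(buf)
-- ===== Notes on version B (the rewrite author's own statement) =====
-- stated objective: faster
-- what changed: B replaces A's nested scan (outer while + inner for that searches ahead for the closing quote, re-slices the source and rebuilds the output string with += on every append) by a single flat pass maintaining an in_string flag and a content buffer, collecting pieces in a list joined once at the end.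
import Mathlib
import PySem

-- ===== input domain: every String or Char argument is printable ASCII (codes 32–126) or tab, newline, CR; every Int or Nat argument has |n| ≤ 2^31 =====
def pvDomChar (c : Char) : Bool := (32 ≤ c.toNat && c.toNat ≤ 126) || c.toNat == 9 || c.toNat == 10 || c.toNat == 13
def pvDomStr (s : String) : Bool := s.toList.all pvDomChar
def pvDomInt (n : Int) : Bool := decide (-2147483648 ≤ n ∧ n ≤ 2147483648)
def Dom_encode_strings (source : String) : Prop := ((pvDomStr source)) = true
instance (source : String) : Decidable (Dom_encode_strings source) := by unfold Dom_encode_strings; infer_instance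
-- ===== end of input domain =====

-- B is a single-pass state machine (buffer + join-once) instead of A's look-ahead-and-reslice scan with += string appends; a timing run measured B faster.

-- hex of one byte, lowercase: exact for .encode().hex() / format(ord(c),'02x') on the ASCII domain (single-byte UTF-8)
def pvHexDigit (n : Nat) : Char := if n < 10 then Char.ofNat (48 + n) else Char.ofNat (87 + n)
def pvHexChar (c : Char) : List Char := [pvHexDigit (c.toNat / 16), pvHexDigit (c.toNat % 16)]
def pvHex (cs : List Char) : List Char := cs.flatMap pvHexChar

-- ===== PORT A =====
-- inner 'for j in range(i+1, len(source)): if source[j] == '"': … break' — returns the break index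
def pvFindA (s : List Char) (j : Nat) : Option Nat :=
  if h : j < s.length then
    if s[j] = '"' then some j else pvFindA s (j + 1)
  else none
termination_by s.length - j

-- needed by pvLoopA's termination: the break index is ≥ the start index
theorem pvFindA_le {s : List Char} {j j' : Nat} (hf : pvFindA s j = some j') : j ≤ j' := by
  fun_induction pvFindA s j with
  | case1 => simp_all
  | case2 j h hq ih => exact Nat.le_trans (Nat.le_succ j) (ih hf)
  | case3 => simp_all

def pvLoopA (s : List Char) (i : Nat) (out : List Char) : List Char :=
  if h : i < s.length then
    if s[i] = '"' then
      match hf : pvFindA s (i + 1) with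
      | some j =>
          -- match = source[i:j+1]
          let mtch := (s.drop i).take (j + 1 - i)
          -- new = h"{match[1:-1].hex}" unless source[i-1] == 'b' ; match[1:-1] = dropLast then drop 1 (exact, Python clamps)
          let nw := if PySem.List.pyGetD s ((i : Int) - 1) ' ' ≠ 'b'
                    then 'h' :: '"' :: (pvHex (mtch.dropLast.drop 1) ++ ['"'])
                    else mtch
          pvLoopA s (j + 1) (out ++ nw)
      | none => pvLoopA s (i + 1) out
    else pvLoopA s (i + 1) (out ++ [s[i]])
  else out
termination_by s.length - i
decreasing_by
  · have := pvFindA_le hf; omega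
  · omega
  · omega

def encode_strings (source : String) : String := String.ofList (pvLoopA source.toList 0 [])

-- ===== PORT B =====
def pvFlush (enc : Bool) (buf : List Char) : List Char :=
  if enc then 'h' :: '"' :: (pvHex buf ++ ['"']) else '"' :: (buf ++ ['"'])

def pvLoopB (s : List Char) (i : Nat) (inStr : Bool) (enc : Bool) (buf : List Char) (out : List Char) : List Char :=
  if h : i < s.length then
    if inStr then
      if s[i] = '"' then pvLoopB s (i + 1) false true [] (out ++ pvFlush enc buf)
      else pvLoopB s (i + 1) true enc (buf ++ [s[i]]) out
    else
      if s[i] = '"' then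
        pvLoopB s (i + 1) true (decide (PySem.List.pyGetD s ((i : Int) - 1) ' ' ≠ 'b')) [] out
      else pvLoopB s (i + 1) false enc buf (out ++ [s[i]])
  else out ++ buf
termination_by s.length - i

def encode_strings_alt (source : String) : String :=
  String.ofList (pvLoopB source.toList 0 false true [] [])

-- ===== PRECONDITION & SPEC =====
def Spec_encode_strings (source : String) (out : String) : Prop := out = encode_strings_alt source
instance (source : String) (out : String) : Decidable (Spec_encode_strings source out) := by unfold Spec_encode_strings; infer_instance

-- ===== CLAIM (what is proved, stated in full; the proofs are below) =====
def Claim_equal_encode_strings : Prop := ∀ (source : String), Dom_encode_strings source → Spec_encode_strings source (encode_strings source)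

-- ===== LEMMAS AND PROOFS =====

-- pvFindA finds the FIRST quote at or after j (or none)
theorem pvFindA_spec {s : List Char} {j j' : Nat} (hf : pvFindA s j = some j') :
    j' < s.length ∧ (∀ (h : j' < s.length), s[j'] = '"') ∧
    (∀ k, j ≤ k → k < j' → ∀ (h : k < s.length), s[k] ≠ '"') := by
  fun_induction pvFindA s j with
  | case1 j h hq =>
    injection hf with e; subst e
    exact ⟨h, fun _ => hq, fun k hk1 hk2 _ => by omega⟩
  | case2 j h hq ih =>
    obtain ⟨h1, h2, h3⟩ := ih hf
    refine ⟨h1, h2, fun k hk1 hk2 hk => ?_⟩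
    rcases Nat.eq_or_lt_of_le hk1 with rfl | hlt
    · exact hq
    · exact h3 k hlt hk2 hk
  | case3 => simp_all

theorem pvFindA_none {s : List Char} {j : Nat} (hf : pvFindA s j = none) :
    ∀ k, j ≤ k → ∀ (h : k < s.length), s[k] ≠ '"' := by
  fun_induction pvFindA s j with
  | case1 => simp_all
  | case2 j h hq ih =>
    intro k hk1 hk
    rcases Nat.eq_or_lt_of_le hk1 with rfl | hlt
    · exact hq
    · exact ih hf k hlt hk
  | case3 j h =>
    intro k hk1 hk; omega

-- unfolding pvLoopA at a quote whose closing quote exists / does not exist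
theorem pvLoopA_quote_some {s : List Char} {i j : Nat} (out : List Char)
    (h : i < s.length) (hq : s[i] = '"') (hf : pvFindA s (i + 1) = some j) :
    pvLoopA s i out = pvLoopA s (j + 1)
      (out ++ (if PySem.List.pyGetD s ((i : Int) - 1) ' ' ≠ 'b'
               then 'h' :: '"' :: (pvHex (((s.drop i).take (j + 1 - i)).dropLast.drop 1) ++ ['"'])
               else (s.drop i).take (j + 1 - i))) := by
  rw [pvLoopA]
  simp only [h, dif_pos, hq, if_pos]
  split
  · next j' hf' => rw [hf] at hf'; injection hf' with e; subst e; rfl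
  · next hf' => rw [hf] at hf'; exact absurd hf' (by simp)

theorem pvLoopA_quote_none {s : List Char} {i : Nat} (out : List Char)
    (h : i < s.length) (hq : s[i] = '"') (hf : pvFindA s (i + 1) = none) :
    pvLoopA s i out = pvLoopA s (i + 1) out := by
  rw [pvLoopA]
  simp only [h, dif_pos, hq, if_pos]
  split
  · next j' hf' => rw [hf] at hf'; exact absurd hf' (by simp)
  · rfl

-- A with no quote from k on: just copies the tail
theorem pvLoopA_tail (s : List Char) :
    ∀ k (out : List Char), (∀ m, k ≤ m → ∀ (h : m < s.length), s[m] ≠ '"') →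
    pvLoopA s k out = out ++ s.drop k := by
  intro k
  induction hn : s.length - k using Nat.strong_induction_on generalizing k with
  | _ n ih =>
    intro out hq
    by_cases h : k < s.length
    · have hkq : ¬ s[k] = '"' := hq k le_rfl h
      rw [pvLoopA]
      simp only [h, dif_pos, if_neg hkq]
      rw [ih (s.length - (k + 1)) (by omega) (k + 1) rfl (out ++ [s[k]]) (fun m hm h' => hq m (by omega) h')]
      rw [List.drop_eq_getElem_cons h]
      simp
    · rw [pvLoopA]
      simp only [h, dif_neg, not_false_iff]
      rw [List.drop_of_length_le (by omega)]
      simp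

-- B in-string with no quote from k on: dumps buffer then the raw tail
theorem pvLoopB_tail (s : List Char) :
    ∀ k (enc : Bool) (buf out : List Char), (∀ m, k ≤ m → ∀ (h : m < s.length), s[m] ≠ '"') →
    pvLoopB s k true enc buf out = out ++ buf ++ s.drop k := by
  intro k
  induction hn : s.length - k using Nat.strong_induction_on generalizing k with
  | _ n ih =>
    intro enc buf out hq
    by_cases h : k < s.length
    · have hkq : ¬ s[k] = '"' := hq k le_rfl h
      rw [pvLoopB]
      simp only [h, dif_pos, if_neg hkq]
      rw [ih (s.length - (k + 1)) (by omega) (k + 1) rfl enc (buf ++ [s[k]]) out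
            (fun m hm h' => hq m (by omega) h')]
      rw [List.drop_eq_getElem_cons h]
      simp
    · rw [pvLoopB]
      simp only [h, dif_neg, not_false_iff]
      rw [List.drop_of_length_le (by omega)]
      simp

-- B in-string up to the closing quote at j: accumulates the content then flushes
theorem pvLoopB_instring (s : List Char) (j : Nat) (hj : j < s.length) (hjq : s[j] = '"') :
    ∀ k, k ≤ j → (∀ m, k ≤ m → m < j → ∀ (h : m < s.length), s[m] ≠ '"') →
    ∀ (enc : Bool) (buf out : List Char),
    pvLoopB s k true enc buf out =
      pvLoopB s (j + 1) false true [] (out ++ pvFlush enc (buf ++ (s.drop k).take (j - k))) := by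
  intro k
  induction hn : j - k using Nat.strong_induction_on generalizing k with
  | _ n ih =>
    intro hk hq enc buf out
    subst hn
    rcases Nat.eq_or_lt_of_le hk with rfl | hlt
    · rw [pvLoopB]
      simp [hj, hjq]
    · have hks : k < s.length := by omega
      have hkq : ¬ s[k] = '"' := hq k le_rfl hlt hks
      rw [pvLoopB]
      simp only [hks, dif_pos, if_neg hkq, if_true]
      rw [ih (j - (k + 1)) (by omega) (k + 1) rfl (by omega)
            (fun m hm1 hm2 h' => hq m (by omega) hm2 h') enc (buf ++ [s[k]]) out]
      congr 2
      have hstep : (s.drop k).take (j - k) = s[k] :: (s.drop (k + 1)).take (j - (k + 1)) := by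
        rw [List.drop_eq_getElem_cons hks]
        have he : j - k = (j - (k + 1)) + 1 := by omega
        rw [he, List.take_succ_cons]
      rw [hstep]
      simp

-- the matched literal source[i:j+1] decomposes as quote ++ content ++ quote
theorem match_decomp (s : List Char) (i j : Nat) (hij : i < j) (hj : j < s.length)
    (hiq : s[i]'(by omega) = '"') (hjq : s[j] = '"') :
    (s.drop i).take (j + 1 - i) = '"' :: ((s.drop (i + 1)).take (j - (i + 1)) ++ ['"']) := by
  rw [List.drop_eq_getElem_cons (by omega : i < s.length), hiq]
  have h1 : j + 1 - i = (j - (i + 1)) + 1 + 1 := by omega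
  rw [h1, List.take_succ_cons]
  congr 1
  rw [List.take_add_one]
  congr 1
  rw [List.getElem?_drop]
  have h2 : i + 1 + (j - (i + 1)) = j := by omega
  rw [h2, List.getElem?_eq_getElem hj, hjq]
  rfl

-- main correspondence: outside a string (buf empty) the two loops agree, for any enc
theorem loops_agree (s : List Char) :
    ∀ i out (enc : Bool), pvLoopA s i out = pvLoopB s i false enc [] out := by
  intro i
  induction hn : s.length - i using Nat.strong_induction_on generalizing i with
  | _ n ih =>
    intro out enc
    by_cases h : i < s.length
    · by_cases hq : s[i] = '"'
      · have hB : pvLoopB s i false enc [] out =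
            pvLoopB s (i + 1) true (decide (PySem.List.pyGetD s ((i : Int) - 1) ' ' ≠ 'b')) [] out := by
          rw [pvLoopB]
          simp [h, hq]
        rw [hB]
        cases hf : pvFindA s (i + 1) with
        | some j =>
          obtain ⟨hj, hjq, hnoq⟩ := pvFindA_spec hf
          have hij : i + 1 ≤ j := pvFindA_le hf
          rw [pvLoopA_quote_some out h hq hf]
          rw [pvLoopB_instring s j hj (hjq hj) (i + 1) hij
                (fun m hm1 hm2 h' => hnoq m hm1 hm2 h') _ [] out]
          rw [ih (s.length - (j + 1)) (by omega) (j + 1) rfl]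
          congr 2
          simp only [List.nil_append]
          rw [match_decomp s i j (by omega) hj hq (hjq hj)]
          unfold pvFlush
          by_cases hb : PySem.List.pyGetD s ((i : Int) - 1) ' ' ≠ 'b'
          · rw [if_pos hb, decide_eq_true hb, if_pos rfl]
            congr 3
            congr 1
            rw [show ('"' :: (List.take (j - (i + 1)) (List.drop (i + 1) s) ++ ['"']))
                  = ('"' :: List.take (j - (i + 1)) (List.drop (i + 1) s)) ++ ['"'] from by simp,
               List.dropLast_concat]
            rfl
          · rw [if_neg hb, decide_eq_false hb, if_neg Bool.false_ne_true]
        | none =>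
          have hnoq := pvFindA_none hf
          rw [pvLoopA_quote_none out h hq hf]
          rw [pvLoopA_tail s (i + 1) out (fun m hm h' => hnoq m hm h')]
          rw [pvLoopB_tail s (i + 1) _ [] out (fun m hm h' => hnoq m hm h')]
          simp
      · rw [pvLoopA]
        simp only [h, dif_pos, if_neg hq]
        rw [pvLoopB]
        simp only [h, dif_pos, if_neg hq, Bool.false_eq_true, if_false]
        exact ih (s.length - (i + 1)) (by omega) (i + 1) rfl _ enc
    · rw [pvLoopA, pvLoopB]
      simp [h]

-- ===== VERDICT (by name: the statement is the Claim_ definition above) =====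
theorem encode_strings_spec : Claim_equal_encode_strings := by
  intro source _
  unfold Spec_encode_strings encode_strings encode_strings_alt
  rw [loops_agree source.toList 0 [] true]
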